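-- pv_equiv track=rewrite | github.com/espbr/bibliometriasensoriomotora | keys_words.py | conta_repetidos
-- ===== SOURCE A (Python) =====
-- def conta_repetidos(l_palavras_final_1, l_palavras_final_2):
--     cont = 0
--     i = 0
--     while i < len(l_palavras_final_1):
--         j = i
--         while j < len(l_palavras_final_2):
--             if l_palavras_final_1 [i] == l_palavras_final_2 [j]:
--                 cont = cont + 1
--                 j = j + 1
--             else:
--                 j = j + 1
--         i = i + 1
--
--     return cont
-- ===== SOURCE B (Python) =====
-- def conta_repetidos(l_palavras_final_1, l_palavras_final_2):
--     # one right-to-left pass: cnt holds a counter of l_palavras_final_2[k:]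
--     cnt = {}
--     total = 0
--     k = len(l_palavras_final_2)
--     for i in range(len(l_palavras_final_1) - 1, -1, -1):
--         while k > i:
--             k -= 1
--             w = l_palavras_final_2[k]
--             cnt[w] = cnt.get(w, 0) + 1
--         total += cnt.get(l_palavras_final_1[i], 0)
--     return total
-- ===== Notes on version B (the rewrite author's own statement) =====
-- stated objective: faster
-- what changed: Replaced A's nested scan (for each i, rescan l2 from index i) by a single right-to-left pass that maintains a suffix-counter dict of l2 and adds the counter entry for l1[i] at each step.
import Mathlib
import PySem

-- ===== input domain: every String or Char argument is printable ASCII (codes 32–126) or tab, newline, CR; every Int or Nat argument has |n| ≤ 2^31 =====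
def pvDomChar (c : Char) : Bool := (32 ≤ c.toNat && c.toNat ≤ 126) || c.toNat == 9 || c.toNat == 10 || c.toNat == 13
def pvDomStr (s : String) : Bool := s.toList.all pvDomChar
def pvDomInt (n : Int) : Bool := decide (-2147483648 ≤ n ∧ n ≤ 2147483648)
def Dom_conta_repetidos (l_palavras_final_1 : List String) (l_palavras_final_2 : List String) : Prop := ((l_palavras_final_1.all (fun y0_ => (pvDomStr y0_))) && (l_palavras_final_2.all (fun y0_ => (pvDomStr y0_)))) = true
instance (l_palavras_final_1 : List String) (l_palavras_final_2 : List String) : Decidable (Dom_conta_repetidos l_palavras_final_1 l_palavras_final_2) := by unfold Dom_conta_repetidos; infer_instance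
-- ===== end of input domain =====

-- B replaces A's quadratic nested scan by a single right-to-left pass maintaining a
-- suffix counter dictionary (objective: faster, O(n*m) -> O(n+m)).

-- ===== PORT A =====
-- inner while loop of A: scans j from its start to len(l2), counting matches of w
def contaJ (w : String) (l2 : List String) (j : Nat) (cont : Int) : Int :=
  if h : j < l2.length then
    if w == l2[j] then contaJ w l2 (j + 1) (cont + 1)
    else contaJ w l2 (j + 1) cont
  else cont
termination_by l2.length - j

-- outer while loop of A
def contaI (l1 l2 : List String) (i : Nat) (cont : Int) : Int :=
  if h : i < l1.length then contaI l1 l2 (i + 1) (contaJ l1[i] l2 i cont)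
  else cont
termination_by l1.length - i

def conta_repetidos (l_palavras_final_1 : List String) (l_palavras_final_2 : List String) : Int :=
  contaI l_palavras_final_1 l_palavras_final_2 0 0

-- ===== PORT B =====
-- inner while loop of B: pulls l2[k-1], …, l2[i] into the counter
def drainB (l2 : List String) (i : Nat) (k : Nat) (cnt : PySem.Dict String Int) : Nat × PySem.Dict String Int :=
  if i < k then
    let k' := k - 1
    let w := l2.getD k' ""
    drainB l2 i k' (cnt.insert w (cnt.getD w 0 + 1))
  else (k, cnt)
termination_by k

-- body of B's for loop; state = (k, cnt, total)
def stepB (l1 l2 : List String) (st : Nat × PySem.Dict String Int × Int) (i : Nat) :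
    Nat × PySem.Dict String Int × Int :=
  let p := drainB l2 i st.1 st.2.1
  (p.1, p.2, st.2.2 + p.2.getD (l1.getD i "") 0)

def conta_repetidos_alt (l_palavras_final_1 : List String) (l_palavras_final_2 : List String) : Int :=
  -- for i in range(len(l1)-1, -1, -1)
  (((List.range l_palavras_final_1.length).reverse).foldl
    (stepB l_palavras_final_1 l_palavras_final_2)
    (l_palavras_final_2.length, PySem.Dict.empty, 0)).2.2

-- ===== PRECONDITION & SPEC =====
def Spec_conta_repetidos (l_palavras_final_1 : List String) (l_palavras_final_2 : List String) (out : Int) : Prop := out = conta_repetidos_alt l_palavras_final_1 l_palavras_final_2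
instance (l_palavras_final_1 : List String) (l_palavras_final_2 : List String) (out : Int) : Decidable (Spec_conta_repetidos l_palavras_final_1 l_palavras_final_2 out) := by unfold Spec_conta_repetidos; infer_instance

-- ===== CLAIM (what is proved, stated in full; the proofs are below) =====
def Claim_equal_conta_repetidos : Prop := ∀ (l_palavras_final_1 : List String) (l_palavras_final_2 : List String), Dom_conta_repetidos l_palavras_final_1 l_palavras_final_2 → Spec_conta_repetidos l_palavras_final_1 l_palavras_final_2 (conta_repetidos l_palavras_final_1 l_palavras_final_2)

-- ===== LEMMAS AND PROOFS =====

-- the common value: sum over m ∈ [i, l1.length) of count of l1[m] in l2.drop m, top-down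
def sumFrom (l1 l2 : List String) (i : Nat) : Int :=
  if i < l1.length then ((l2.drop i).count (l1.getD i "") : Int) + sumFrom l1 l2 (i + 1)
  else 0
termination_by l1.length - i

-- the same sum, bottom-up (matches B's reversed loop)
def sumRev (l1 l2 : List String) : Nat → Int
  | 0 => 0
  | n + 1 => ((l2.drop n).count (l1.getD n "") : Int) + sumRev l1 l2 n

theorem contaJ_eq (w : String) (l2 : List String) :
    ∀ j cont, contaJ w l2 j cont = cont + ((l2.drop j).count w : Int) := by
  intro j cont
  fun_induction contaJ w l2 j cont with
  | case1 j cont h heq ih =>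
    rw [ih, List.drop_eq_getElem_cons h, List.count_cons]
    have hb : (l2[j] == w) = true := beq_iff_eq.mpr (eq_of_beq heq).symm
    rw [hb]; simp; omega
  | case2 j cont h heq ih =>
    rw [ih, List.drop_eq_getElem_cons h, List.count_cons]
    have hb : (l2[j] == w) = false :=
      beq_eq_false_iff_ne.mpr (fun e => heq (beq_iff_eq.mpr e.symm))
    rw [hb]; simp
  | case3 j cont h =>
    have : l2.drop j = [] := List.drop_eq_nil_of_le (by omega)
    simp [this]

theorem contaI_eq (l1 l2 : List String) :
    ∀ i cont, contaI l1 l2 i cont = cont + sumFrom l1 l2 i := by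
  intro i cont
  fun_induction contaI l1 l2 i cont with
  | case1 i cont h ih =>
    rw [ih, contaJ_eq]
    conv_rhs => rw [sumFrom, if_pos h]
    rw [List.getD_eq_getElem l1 "" h]; ring
  | case2 i cont h =>
    rw [sumFrom, if_neg h]; omega

theorem drainB_spec (l2 : List String) (i : Nat) :
    ∀ (k : Nat) (cnt : PySem.Dict String Int), k ≤ l2.length →
      (∀ w, cnt.getD w 0 = ((l2.drop k).count w : Int)) →
      (drainB l2 i k cnt).1 = min i k ∧
      (∀ w, (drainB l2 i k cnt).2.getD w 0 = ((l2.drop (min i k)).count w : Int)) := by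
  intro k
  induction k with
  | zero =>
    intro cnt hk hcnt
    rw [drainB, if_neg (by omega)]
    exact ⟨by simp, by simpa using hcnt⟩
  | succ k ih =>
    intro cnt hk hcnt
    rw [drainB]
    by_cases h : i < k + 1
    · simp only [if_pos h, Nat.add_sub_cancel]
      have hk' : k < l2.length := by omega
      have hdrop : l2.drop k = l2[k] :: l2.drop (k + 1) := List.drop_eq_getElem_cons hk'
      have hget : l2.getD k "" = l2[k] := List.getD_eq_getElem l2 "" hk'
      have hcnt' : ∀ w,
          ((cnt.insert (l2.getD k "") (cnt.getD (l2.getD k "") 0 + 1)).getD w 0)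
            = ((l2.drop k).count w : Int) := by
        intro w
        rw [PySem.Dict.getD_insert, hget, hdrop, List.count_cons]
        by_cases hw : w = l2[k]
        · subst hw; rw [if_pos rfl, hcnt]; simp
        · rw [if_neg hw, hcnt]
          have hb : (l2[k] == w) = false := beq_eq_false_iff_ne.mpr (fun e => hw e.symm)
          rw [hb]; simp
      have := ih _ (by omega) hcnt'
      have hmin : min i k = min i (k + 1) := by omega
      rw [hmin] at this
      exact this
    · simp only [if_neg h]
      have hmin : min i (k + 1) = k + 1 := by omega
      exact ⟨by simp [hmin], by simpa [hmin] using hcnt⟩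

-- at the index being processed, the counter's suffix is the true suffix
theorem drop_min_eq (l2 : List String) (n k : Nat) (h : min n l2.length ≤ k) :
    l2.drop (min n k) = l2.drop n := by
  have : min n k = n ∨ (l2.length ≤ min n k ∧ l2.length ≤ n) := by omega
  rcases this with h1 | ⟨h1, h2⟩
  · rw [h1]
  · rw [List.drop_eq_nil_of_le h1, List.drop_eq_nil_of_le h2]

theorem foldB_eq (l1 l2 : List String) :
    ∀ (n : Nat) (k : Nat) (cnt : PySem.Dict String Int) (t : Int),
      min n l2.length ≤ k → k ≤ l2.length →
      (∀ w, cnt.getD w 0 = ((l2.drop k).count w : Int)) →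
      (((List.range n).reverse).foldl (stepB l1 l2) (k, cnt, t)).2.2 = t + sumRev l1 l2 n := by
  intro n
  induction n with
  | zero => intro k cnt t _ _ _; simp [sumRev]
  | succ n ih =>
    intro k cnt t hmin hk hcnt
    rw [List.range_succ, List.reverse_append]
    simp only [List.reverse_singleton, List.singleton_append, List.foldl_cons]
    obtain ⟨h1, h2⟩ := drainB_spec l2 n k cnt hk hcnt
    have hdrop := drop_min_eq l2 n k (le_trans (by omega) hmin)
    have hstep : stepB l1 l2 (k, cnt, t) n
        = (min n k, (drainB l2 n k cnt).2,
           t + ((l2.drop n).count (l1.getD n "") : Int)) := by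
      show ((drainB l2 n k cnt).1, (drainB l2 n k cnt).2,
        t + (drainB l2 n k cnt).2.getD (l1.getD n "") 0) = _
      rw [h1, h2, hdrop]
    rw [hstep, ih (min n k) _ _ (by omega) (by omega) (fun w => by rw [h2 w, hdrop, ← hdrop])]
    rw [sumRev]; ring
  -- note: the counter hypothesis for ih is h2 rewritten along hdrop

theorem sumFrom_eq_sumRev (l1 l2 : List String) :
    ∀ (d i : Nat), i + d = l1.length →
      sumFrom l1 l2 i = sumRev l1 l2 l1.length - sumRev l1 l2 i := by
  intro d
  induction d with
  | zero =>
    intro i h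
    rw [sumFrom, if_neg (by omega)]
    subst h; simp
  | succ d ih =>
    intro i h
    have hi : i < l1.length := by omega
    conv_lhs => rw [sumFrom, if_pos hi]
    rw [ih (i + 1) (by omega)]
    have : sumRev l1 l2 (i + 1) = ((l2.drop i).count (l1.getD i "") : Int) + sumRev l1 l2 i := rfl
    omega

-- ===== VERDICT (by name: the statement is the Claim_ definition above) =====
theorem conta_repetidos_spec : Claim_equal_conta_repetidos := by
  intro l1 l2 _
  unfold Spec_conta_repetidos conta_repetidos conta_repetidos_alt
  rw [contaI_eq]
  rw [foldB_eq l1 l2 l1.length l2.length PySem.Dict.empty 0 (by omega) (le_refl _)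
    (by intro w; simp [PySem.Dict.getD_empty, List.drop_length])]
  rw [sumFrom_eq_sumRev l1 l2 l1.length 0 (by omega)]
  simp [sumRev]
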